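-- pv_equiv track=rewrite | github.com/jgeller11/gonality | gonalitysolver.py | genAntiPrismGraph
-- ===== SOURCE A (Python) =====
-- import copy
--
-- def genAntiPrismGraph(n):
--     row = [0 for i in range(2*n)]
--     output = [copy.deepcopy(row) for i in range(2*n)]
--     for i in range(n):
--         output[i][(i+1)%n]=1
--         output[(i+1)%n][i]=1
--         output[i+n][((i+1)%n)+n]=1
--         output[((i+1)%n)+n][i+n]=1
--         output[i][i+n]=1
--         output[i+n][i]=1
--         output[i][((i+1)%n)+n]=1
--         output[((i+1)%n)+n][i]=1
--     return output
-- ===== SOURCE B (Python) =====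
-- def genAntiPrismGraph(n):
--     # Build the edge set once, then fill the dense matrix by membership test.
--     edges = set()
--     for i in range(n):
--         j = (i + 1) % n
--         for e in ((i, j), (j, i), (i + n, j + n), (j + n, i + n),
--                   (i, i + n), (i + n, i), (i, j + n), (j + n, i)):
--             edges.add(e)
--     return [[1 if (r, c) in edges else 0 for c in range(2 * n)]
--             for r in range(2 * n)]
-- ===== Notes on version B (the rewrite author's own statement) =====
-- stated objective: alternative
-- what changed: A scatters 1s into a preallocated 2n x 2n zero matrix by index assignment; B first collects the antiprism edge pairs into a set and then builds the matrix with a dense comprehension testing membership.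
import Mathlib
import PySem

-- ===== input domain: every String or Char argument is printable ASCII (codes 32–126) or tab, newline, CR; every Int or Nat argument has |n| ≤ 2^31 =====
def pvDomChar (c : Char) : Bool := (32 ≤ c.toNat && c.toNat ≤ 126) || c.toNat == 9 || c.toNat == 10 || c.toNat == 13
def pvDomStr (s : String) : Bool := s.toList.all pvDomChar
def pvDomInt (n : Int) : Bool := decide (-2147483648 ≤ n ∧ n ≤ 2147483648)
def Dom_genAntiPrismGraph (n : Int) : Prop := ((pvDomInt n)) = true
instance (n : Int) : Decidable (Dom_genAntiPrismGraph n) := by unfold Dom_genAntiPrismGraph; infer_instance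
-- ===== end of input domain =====

-- B collects the edge pairs into a set and fills the matrix by membership test, instead of A's index-scatter into a zero matrix.

-- ===== PORT A =====
-- output[r][c] = v  (Python index assignment on a nested list; in A's loop the indices are always in range)
def pvSet2 (out : List (List Int)) (r c v : Int) : List (List Int) :=
  PySem.List.pySetD out r (PySem.List.pySetD (PySem.List.pyGetD out r []) c v)

def genAntiPrismGraph (n : Int) : List (List Int) :=
  (PySem.List.pyRange 0 n 1).foldl (fun out i =>
    pvSet2 (pvSet2 (pvSet2 (pvSet2 (pvSet2 (pvSet2 (pvSet2 (pvSet2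
      out i (PySem.Int.mod (i+1) n) 1)
      (PySem.Int.mod (i+1) n) i 1)
      (i+n) (PySem.Int.mod (i+1) n + n) 1)
      (PySem.Int.mod (i+1) n + n) (i+n) 1)
      i (i+n) 1)
      (i+n) i 1)
      i (PySem.Int.mod (i+1) n + n) 1)
      (PySem.Int.mod (i+1) n + n) i 1)
    ((PySem.List.pyRange 0 (2*n) 1).map (fun _ =>
      (PySem.List.pyRange 0 (2*n) 1).map (fun _ => (0 : Int))))

-- ===== PORT B =====
def genAntiPrismGraph_alt (n : Int) : List (List Int) :=
  let edges : PySem.Set (Int × Int) :=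
    (PySem.List.pyRange 0 n 1).foldl (fun s i =>
      [(i, PySem.Int.mod (i+1) n), (PySem.Int.mod (i+1) n, i),
       (i+n, PySem.Int.mod (i+1) n + n), (PySem.Int.mod (i+1) n + n, i+n),
       (i, i+n), (i+n, i),
       (i, PySem.Int.mod (i+1) n + n), (PySem.Int.mod (i+1) n + n, i)].foldl
        PySem.Set.add s)
      PySem.Set.empty
  (PySem.List.pyRange 0 (2*n) 1).map (fun r =>
    (PySem.List.pyRange 0 (2*n) 1).map (fun c =>
      if PySem.Set.contains edges (r, c) then 1 else 0))

-- ===== PRECONDITION & SPEC =====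
def Spec_genAntiPrismGraph (n : Int) (out : List (List Int)) : Prop := out = genAntiPrismGraph_alt n
instance (n : Int) (out : List (List Int)) : Decidable (Spec_genAntiPrismGraph n out) := by unfold Spec_genAntiPrismGraph; infer_instance

-- ===== CLAIM (what is proved, stated in full; the proofs are below) =====
def Claim_equal_genAntiPrismGraph : Prop := ∀ (n : Int), Dom_genAntiPrismGraph n → Spec_genAntiPrismGraph n (genAntiPrismGraph n)

-- ===== LEMMAS AND PROOFS =====

-- the matrix whose (r,c) entry is 1 exactly when (r,c) ∈ S
def pvFill (n : Int) (S : PySem.Set (Int × Int)) : List (List Int) :=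
  (PySem.List.pyRange 0 (2*n) 1).map (fun r =>
    (PySem.List.pyRange 0 (2*n) 1).map (fun c =>
      if PySem.Set.contains S (r, c) then 1 else 0))

theorem pvSetD_map_pyRange {α : Type} (f : Int → α) (m r : Int) (v : α) (h0 : 0 ≤ r) :
    PySem.List.pySetD ((PySem.List.pyRange 0 m 1).map f) r v
      = (PySem.List.pyRange 0 m 1).map (fun x => if x = r then v else f x) := by
  rw [PySem.List.pySetD_of_nonneg _ v h0]
  apply List.ext_getElem
  · simp [PySem.List.length_pyRange_one]
  · intro k h1 h2
    simp only [List.getElem_set, List.getElem_map, PySem.List.getElem_pyRange_one]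
    by_cases hkr : k = r.toNat
    · simp [hkr, Int.toNat_of_nonneg h0]
    · have h1' : ¬ r.toNat = k := fun he => hkr he.symm
      have h2' : ¬ ((0 : Int) + k = r) := by omega
      simp only [if_neg h1']
      rw [if_neg h2']

theorem pvGetD_map_pyRange' {α : Type} (f : Int → α) (m r : Int) (d : α) (h0 : 0 ≤ r) (h : r < m) :
    PySem.List.pyGetD ((PySem.List.pyRange 0 m 1).map f) r d = f r := by
  rw [PySem.List.pyGetD_of_nonneg _ d h0]
  have hk : r.toNat < ((PySem.List.pyRange 0 m 1).map f).length := by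
    simp [PySem.List.length_pyRange_one]; omega
  rw [List.getD_eq_getElem _ _ hk]
  simp only [List.getElem_map, PySem.List.getElem_pyRange_one]
  congr 1
  omega

-- one Python assignment output[r][c] = 1 on a membership-matrix adds (r,c) to the set
theorem pvSet2_fill (n : Int) (S : PySem.Set (Int × Int)) (r c : Int)
    (hr0 : 0 ≤ r) (hr : r < 2*n) (hc0 : 0 ≤ c) :
    pvSet2 (pvFill n S) r c 1 = pvFill n (PySem.Set.add S (r, c)) := by
  unfold pvSet2 pvFill
  rw [pvGetD_map_pyRange' _ _ _ _ hr0 hr,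
      pvSetD_map_pyRange _ _ _ _ hc0,
      pvSetD_map_pyRange _ _ _ _ hr0]
  apply List.map_congr_left
  intro x _
  by_cases hxr : x = r
  · rw [if_pos hxr]
    apply List.map_congr_left
    intro y _
    by_cases hyc : y = c
    · rw [if_pos hyc]
      simp [PySem.Set.mem_add, hxr, hyc]
    · rw [if_neg hyc]
      simp [PySem.Set.mem_add, Prod.ext_iff, hxr, hyc]
  · rw [if_neg hxr]
    apply List.map_congr_left
    intro y _
    simp [PySem.Set.mem_add, Prod.ext_iff, hxr]

set_option maxHeartbeats 1000000 in
-- A's eight assignments for one i equal B's eight set-insertions for that i, on a membership-matrix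
theorem pvStep_fill (n : Int) (S : PySem.Set (Int × Int)) (i : Int)
    (h0 : 0 ≤ i) (h : i < n) :
    pvSet2 (pvSet2 (pvSet2 (pvSet2 (pvSet2 (pvSet2 (pvSet2 (pvSet2
      (pvFill n S) i (PySem.Int.mod (i+1) n) 1)
      (PySem.Int.mod (i+1) n) i 1)
      (i+n) (PySem.Int.mod (i+1) n + n) 1)
      (PySem.Int.mod (i+1) n + n) (i+n) 1)
      i (i+n) 1)
      (i+n) i 1)
      i (PySem.Int.mod (i+1) n + n) 1)
      (PySem.Int.mod (i+1) n + n) i 1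
      = pvFill n
        (PySem.Set.add (PySem.Set.add (PySem.Set.add (PySem.Set.add (PySem.Set.add (PySem.Set.add (PySem.Set.add (PySem.Set.add
          S (i, PySem.Int.mod (i+1) n)) (PySem.Int.mod (i+1) n, i))
          (i+n, PySem.Int.mod (i+1) n + n)) (PySem.Int.mod (i+1) n + n, i+n))
          (i, i+n)) ((i+n, i) : Int × Int))
          (i, PySem.Int.mod (i+1) n + n)) (PySem.Int.mod (i+1) n + n, i)) := by
  have hn : 0 < n := lt_of_le_of_lt h0 h
  have hj0 : 0 ≤ PySem.Int.mod (i+1) n := PySem.Int.mod_nonneg _ hn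
  have hj : PySem.Int.mod (i+1) n < n := PySem.Int.mod_lt _ hn
  rw [pvSet2_fill n _ _ _ (by omega) (by omega) (by omega),
      pvSet2_fill n _ _ _ (by omega) (by omega) (by omega),
      pvSet2_fill n _ _ _ (by omega) (by omega) (by omega),
      pvSet2_fill n _ _ _ (by omega) (by omega) (by omega),
      pvSet2_fill n _ _ _ (by omega) (by omega) (by omega),
      pvSet2_fill n _ _ _ (by omega) (by omega) (by omega),
      pvSet2_fill n _ _ _ (by omega) (by omega) (by omega),
      pvSet2_fill n _ _ _ (by omega) (by omega) (by omega)]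

-- loop invariant: folding A's body over any in-range index list keeps the membership-matrix shape
theorem pvLoop_fill (n : Int) (L : List Int) (S : PySem.Set (Int × Int))
    (hL : ∀ i ∈ L, 0 ≤ i ∧ i < n) :
    L.foldl (fun out i =>
      pvSet2 (pvSet2 (pvSet2 (pvSet2 (pvSet2 (pvSet2 (pvSet2 (pvSet2
        out i (PySem.Int.mod (i+1) n) 1)
        (PySem.Int.mod (i+1) n) i 1)
        (i+n) (PySem.Int.mod (i+1) n + n) 1)
        (PySem.Int.mod (i+1) n + n) (i+n) 1)
        i (i+n) 1)
        (i+n) i 1)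
        i (PySem.Int.mod (i+1) n + n) 1)
        (PySem.Int.mod (i+1) n + n) i 1) (pvFill n S)
      = pvFill n (L.foldl (fun s i =>
        PySem.Set.add (PySem.Set.add (PySem.Set.add (PySem.Set.add (PySem.Set.add (PySem.Set.add (PySem.Set.add (PySem.Set.add
          s (i, PySem.Int.mod (i+1) n)) (PySem.Int.mod (i+1) n, i))
          (i+n, PySem.Int.mod (i+1) n + n)) (PySem.Int.mod (i+1) n + n, i+n))
          (i, i+n)) ((i+n, i) : Int × Int))
          (i, PySem.Int.mod (i+1) n + n)) (PySem.Int.mod (i+1) n + n, i)) S) := by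
  induction L generalizing S with
  | nil => rfl
  | cons a L ih =>
    have ha := hL a (List.mem_cons_self)
    simp only [List.foldl_cons]
    rw [pvStep_fill n S a ha.1 ha.2]
    exact ih _ (fun i hi => hL i (List.mem_cons_of_mem _ hi))

-- A's initial zero matrix is the membership-matrix of the empty set
theorem pvFill_empty (n : Int) :
    pvFill n PySem.Set.empty
      = (PySem.List.pyRange 0 (2*n) 1).map (fun _ =>
          (PySem.List.pyRange 0 (2*n) 1).map (fun _ => (0 : Int))) := by
  unfold pvFill
  apply List.map_congr_left
  intro r _
  apply List.map_congr_left
  intro c _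
  simp [PySem.Set.empty]

-- ===== VERDICT (by name: the statement is the Claim_ definition above) =====
set_option maxHeartbeats 1000000 in
theorem genAntiPrismGraph_spec : Claim_equal_genAntiPrismGraph := by
  intro n _
  show genAntiPrismGraph n = genAntiPrismGraph_alt n
  have hA : genAntiPrismGraph n = pvFill n ((PySem.List.pyRange 0 n 1).foldl (fun s i =>
        PySem.Set.add (PySem.Set.add (PySem.Set.add (PySem.Set.add (PySem.Set.add (PySem.Set.add (PySem.Set.add (PySem.Set.add
          s (i, PySem.Int.mod (i+1) n)) (PySem.Int.mod (i+1) n, i))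
          (i+n, PySem.Int.mod (i+1) n + n)) (PySem.Int.mod (i+1) n + n, i+n))
          (i, i+n)) ((i+n, i) : Int × Int))
          (i, PySem.Int.mod (i+1) n + n)) (PySem.Int.mod (i+1) n + n, i)) PySem.Set.empty) := by
    unfold genAntiPrismGraph
    rw [← pvFill_empty n]
    exact pvLoop_fill n _ PySem.Set.empty (fun i hi => PySem.List.mem_pyRange_one.mp hi)
  have hB : genAntiPrismGraph_alt n = pvFill n ((PySem.List.pyRange 0 n 1).foldl (fun s i =>
        PySem.Set.add (PySem.Set.add (PySem.Set.add (PySem.Set.add (PySem.Set.add (PySem.Set.add (PySem.Set.add (PySem.Set.add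
          s (i, PySem.Int.mod (i+1) n)) (PySem.Int.mod (i+1) n, i))
          (i+n, PySem.Int.mod (i+1) n + n)) (PySem.Int.mod (i+1) n + n, i+n))
          (i, i+n)) ((i+n, i) : Int × Int))
          (i, PySem.Int.mod (i+1) n + n)) (PySem.Int.mod (i+1) n + n, i)) PySem.Set.empty) := by
    have hfun : (fun (s : PySem.Set (Int × Int)) (i : Int) =>
        List.foldl PySem.Set.add s
          [(i, PySem.Int.mod (i+1) n), (PySem.Int.mod (i+1) n, i),
           (i+n, PySem.Int.mod (i+1) n + n), (PySem.Int.mod (i+1) n + n, i+n),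
           (i, i+n), (i+n, i),
           (i, PySem.Int.mod (i+1) n + n), (PySem.Int.mod (i+1) n + n, i)])
        = (fun (s : PySem.Set (Int × Int)) (i : Int) =>
        PySem.Set.add (PySem.Set.add (PySem.Set.add (PySem.Set.add (PySem.Set.add (PySem.Set.add (PySem.Set.add (PySem.Set.add
          s (i, PySem.Int.mod (i+1) n)) (PySem.Int.mod (i+1) n, i))
          (i+n, PySem.Int.mod (i+1) n + n)) (PySem.Int.mod (i+1) n + n, i+n))
          (i, i+n)) ((i+n, i) : Int × Int))
          (i, PySem.Int.mod (i+1) n + n)) (PySem.Int.mod (i+1) n + n, i)) := by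
      funext s i
      rfl
    unfold genAntiPrismGraph_alt
    rw [hfun]
    rfl
  rw [hA, hB]
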